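-- pv_equiv track=rewrite | github.com/tizilemes03/guiaspedorras | guia7jujuy.py | tres_vocales_dif
-- ===== SOURCE A (Python) =====
-- def tres_vocales_dif(palabra:str)->bool:
--     vocales = ["a","e","i","o","u","A","E","I","O","U"]
--     resu:int = 0
--     resultado:bool = False
--     for i in range(len(palabra)):
--         for v in range(len(vocales)):
--             if (vocales[v] == palabra[i]):
--                 resu= resu + 1
--                 vocales[v] = "" #esto quita la vocal para que no busque repetidas en la lista!!!
--     if (resu>=3):
--         resultado:bool = True
--     return resultado
-- ===== SOURCE B (Python) =====
-- def tres_vocales_dif(palabra: str) -> bool: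
--     # count how many of the ten vowels occur in the word (each at most once)
--     return sum(1 for v in "aeiouAEIOU" if v in palabra) >= 3
-- ===== Notes on version B (the rewrite author's own statement) =====
-- stated objective: simpler
-- what changed: Replaces the char-by-char scan with an in-place-mutated vowel list by a single pass over the fixed ten-vowel string counting which vowels occur in the word via membership tests.
import Mathlib
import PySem

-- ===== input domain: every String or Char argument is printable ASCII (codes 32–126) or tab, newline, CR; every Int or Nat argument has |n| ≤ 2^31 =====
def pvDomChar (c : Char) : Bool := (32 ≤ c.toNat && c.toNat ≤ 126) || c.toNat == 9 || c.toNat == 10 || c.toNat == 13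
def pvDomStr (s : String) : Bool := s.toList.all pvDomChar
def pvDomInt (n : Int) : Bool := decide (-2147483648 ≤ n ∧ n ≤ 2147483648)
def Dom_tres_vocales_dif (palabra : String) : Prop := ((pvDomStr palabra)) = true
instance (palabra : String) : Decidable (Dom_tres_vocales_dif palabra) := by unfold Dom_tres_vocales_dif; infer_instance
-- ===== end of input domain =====

-- B replaces A's per-character scan with an in-place-mutated vowel list by one pass
-- over the fixed ten-vowel string counting which vowels occur in the word (objective: simpler).

-- ===== PORT A =====
-- inner loop `for v in range(len(vocales)): if vocales[v] == palabra[i]: resu += 1; vocales[v] = ""`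
-- as the structural recursion over the list with the same state (vocales, resu), same order, same updates
def pvInnerA : List String → String → Int → List String × Int
  | [], _, resu => ([], resu)
  | s :: rest, c, resu =>
    if s == c then
      let (r, n) := pvInnerA rest c (resu + 1)
      ("" :: r, n)
    else
      let (r, n) := pvInnerA rest c resu
      (s :: r, n)

def tres_vocales_dif (palabra : String) : Bool :=
  -- `for i in range(len(palabra))` reading palabra[i] = fold over the characters in order
  let st := palabra.toList.foldl
    (fun st c => pvInnerA st.1 (String.singleton c) st.2)
    (["a","e","i","o","u","A","E","I","O","U"], (0 : Int))
  if 3 ≤ st.2 then true else false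

-- ===== PORT B =====
-- `v in palabra` for the 1-char strings drawn from "aeiouAEIOU" is exactly char membership
def tres_vocales_dif_alt (palabra : String) : Bool :=
  decide ((3 : Int) ≤ ((("aeiouAEIOU".toList).filter
      (fun v => decide (v ∈ palabra.toList))).map (fun _ => (1 : Int))).sum)

-- ===== PRECONDITION & SPEC =====
def Spec_tres_vocales_dif (palabra : String) (out : Bool) : Prop := out = tres_vocales_dif_alt palabra
instance (palabra : String) (out : Bool) : Decidable (Spec_tres_vocales_dif palabra out) := by unfold Spec_tres_vocales_dif; infer_instance

-- ===== CLAIM (what is proved, stated in full; the proofs are below) =====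
def Claim_equal_tres_vocales_dif : Prop := ∀ (palabra : String), Dom_tres_vocales_dif palabra → Spec_tres_vocales_dif palabra (tres_vocales_dif palabra)

-- ===== LEMMAS AND PROOFS =====

-- state abstraction: the vowel slot for v is blanked iff v was already seen (in p)
def pvBlank (p : List Char) (v : Char) : String :=
  if v ∈ p then "" else String.singleton v

theorem pvInnerA_blank (vs : List Char) (p : List Char) (c : Char) (n : Int) :
    pvInnerA (vs.map (pvBlank p)) (String.singleton c) n
      = (vs.map (pvBlank (p ++ [c])),
         n + ((vs.filter (fun v => decide (v = c ∧ v ∉ p))).length : Int)) := by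
  induction vs generalizing n with
  | nil => simp [pvInnerA]
  | cons v rest ih =>
    by_cases hv : v ∈ p
    · have h1 : pvBlank p v = "" := by simp [pvBlank, hv]
      have h2 : pvBlank (p ++ [c]) v = "" := by simp [pvBlank, hv]
      have hne : (("" : String) == String.singleton c) = false := by
        simp [String.singleton]
      simp only [List.map_cons, h1, h2, pvInnerA, hne, Bool.false_eq_true, ih]
      simp [hv]
    · have h1 : pvBlank p v = String.singleton v := by simp [pvBlank, hv]
      have hbeq : (String.singleton v == String.singleton c) = (v == c) := by
        simp [String.singleton]
      by_cases hc : v = c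
      · subst hc
        have h2 : pvBlank (p ++ [v]) v = "" := by simp [pvBlank]
        simp only [List.map_cons, h1, h2, pvInnerA, hbeq, BEq.rfl, ih]
        simp [hv]
        ring
      · have h2 : pvBlank (p ++ [c]) v = String.singleton v := by
          simp [pvBlank, hv, hc]
        have hvc : (v == c) = false := by simp [hc]
        simp only [List.map_cons, h1, h2, pvInnerA, hbeq, hvc, Bool.false_eq_true, ih]
        simp [hc]

-- indicator identity summed over the vowel list
theorem pvCount_split (vs : List Char) (p l : List Char) (c : Char) :
    (vs.filter (fun v => decide (v = c ∧ v ∉ p))).length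
      + (vs.filter (fun v => decide (v ∈ l ∧ v ∉ p ++ [c]))).length
      = (vs.filter (fun v => decide (v ∈ c :: l ∧ v ∉ p))).length := by
  induction vs with
  | nil => simp
  | cons v rest ih =>
    simp only [List.filter_cons]
    by_cases hp : v ∈ p
    · rw [if_neg (by simp [hp]), if_neg (by simp [hp]), if_neg (by simp [hp])]
      exact ih
    · by_cases hc : v = c
      · subst hc
        rw [if_pos (by simp [hp]), if_neg (by simp), if_pos (by simp [hp])]
        simp only [List.length_cons]
        omega
      · by_cases hl : v ∈ l
        · rw [if_neg (by simp [hc]), if_pos (by simp [hl, hp, hc]), if_pos (by simp [hl, hp])]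
          simp only [List.length_cons]
          omega
        · rw [if_neg (by simp [hc]), if_neg (by simp [hl]), if_neg (by simp [hl, hc])]
          exact ih

theorem pvFold_inv (vs : List Char) (l p : List Char) (n : Int) :
    l.foldl (fun st c => pvInnerA st.1 (String.singleton c) st.2) (vs.map (pvBlank p), n)
      = (vs.map (pvBlank (p ++ l)),
         n + ((vs.filter (fun v => decide (v ∈ l ∧ v ∉ p))).length : Int)) := by
  induction l generalizing p n with
  | nil => simp
  | cons c l ih =>
    simp only [List.foldl_cons, pvInnerA_blank, ih, List.append_assoc, List.singleton_append]
    refine congrArg _ ?_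
    have := pvCount_split vs p l c
    omega

-- ===== VERDICT (by name: the statement is the Claim_ definition above) =====
theorem tres_vocales_dif_spec : Claim_equal_tres_vocales_dif := by
  intro palabra _
  unfold Spec_tres_vocales_dif tres_vocales_dif tres_vocales_dif_alt
  have hinit : (["a","e","i","o","u","A","E","I","O","U"] : List String)
      = (("aeiouAEIOU".toList).map (pvBlank [])) := by decide
  rw [hinit, pvFold_inv]
  have hfe : (("aeiouAEIOU".toList).filter (fun v => decide (v ∈ palabra.toList ∧ v ∉ ([] : List Char))))
      = (("aeiouAEIOU".toList).filter (fun v => decide (v ∈ palabra.toList))) := by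
    apply List.filter_congr
    intro v _
    simp
  have hsum : ∀ (xs : List Char), ((xs.map (fun _ => (1 : Int))).sum) = xs.length := by
    intro xs; simp
  rw [hfe] at *
  simp only [hsum, zero_add]
  by_cases h : (3 : Int) ≤ ((("aeiouAEIOU".toList).filter (fun v => decide (v ∈ palabra.toList))).length : Int) <;>
    simp [h]
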